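-- pv_equiv track=rewrite | github.com/NoobyNull/Digital-Workshop | src/gui/model_library/numeric_sort_proxy.py | _tokenize_clause
-- ===== SOURCE A (Python) =====
-- def _tokenize_clause(clause: str):
--     """Tokenize a clause respecting quotes and '+' as AND separators."""
--     tokens = []
--     current = []
--     in_quote = False
--     i = 0
--     while i < len(clause):
--         ch = clause[i]
--         if ch == '"':
--             in_quote = not in_quote
--             i += 1
--             continue
--         if not in_quote and ch in {"+", " "}:
--             if current:
--                 tokens.append("".join(current))
--                 current = []
--             i += 1
--             continue
--         current.append(ch)
--         i += 1
--     if current: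
--         tokens.append("".join(current))
--     return tokens
-- ===== SOURCE B (Python) =====
-- def _tokenize_clause(clause: str):
--     """Tokenize a clause respecting quotes and '+' as AND separators."""
--     tokens = []
--     buf = ""
--     for idx, seg in enumerate(clause.split('"')):
--         if idx % 2 == 1:
--             buf += seg
--         else:
--             pieces = seg.replace('+', ' ').split(' ')
--             buf += pieces[0]
--             for piece in pieces[1:]:
--                 if buf:
--                     tokens.append(buf)
--                 buf = piece
--     if buf:
--         tokens.append(buf)
--     return tokens
-- ===== Notes on version B (the rewrite author's own statement) =====
-- stated objective: faster
-- what changed: Replaced A's index-driven per-character state machine (manual in_quote toggling and per-char branching) by a segment decomposition: split the clause on the double-quote character so segments alternate outside/inside quotes, append inside segments to a running buffer, and tokenize outside segments with str.replace/str.split, carrying the buffer across segment boundaries.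
import Mathlib
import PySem

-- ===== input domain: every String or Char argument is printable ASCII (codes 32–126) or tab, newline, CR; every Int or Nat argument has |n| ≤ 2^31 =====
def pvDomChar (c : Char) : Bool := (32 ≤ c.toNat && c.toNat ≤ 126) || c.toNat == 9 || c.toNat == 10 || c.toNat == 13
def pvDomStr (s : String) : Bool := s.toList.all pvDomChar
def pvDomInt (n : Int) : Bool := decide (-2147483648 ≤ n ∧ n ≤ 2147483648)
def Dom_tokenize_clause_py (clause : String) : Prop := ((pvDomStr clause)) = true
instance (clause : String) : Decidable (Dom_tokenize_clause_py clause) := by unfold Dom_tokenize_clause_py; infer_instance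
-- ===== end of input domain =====

-- B tokenizes by splitting on '"' into alternating outside/inside segments and splitting
-- outside segments with replace/split, instead of A's per-character in_quote state machine.


-- ===== PORT A =====
-- while loop over indices i, state (tokens, current, in_quote), ported as structural recursion
def tokAGo : List Char → List String → List Char → Bool → List String
  | [], tokens, current, _ =>
      if current.isEmpty then tokens else tokens ++ [String.mk current]
  | ch :: rest, tokens, current, in_quote =>
      if ch = '"' then tokAGo rest tokens current (!in_quote)
      else if !in_quote && (ch == '+' || ch == ' ') then
        if current.isEmpty then tokAGo rest tokens [] in_quote
        else tokAGo rest (tokens ++ [String.mk current]) [] in_quote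
      else tokAGo rest tokens (current ++ [ch]) in_quote

def tokenize_clause_py (clause : String) : List String :=
  tokAGo clause.toList [] [] false

-- ===== PORT B =====
-- state = (tokens, buf); flush buf as a token if non-empty, then start buf at the new piece
def bStepPiece (st : List String × List Char) (piece : List Char) : List String × List Char :=
  ((if st.2.isEmpty then st.1 else st.1 ++ [String.mk st.2]), piece)

-- one enumerated segment: odd index = inside quotes (append), even = outside (replace/split)
def bSeg (st : List String × List Char) (idx : Int) (seg : List Char) : List String × List Char :=
  if idx % 2 == 1 then (st.1, st.2 ++ seg)
  else
    let pieces := PySem.Chars.splitOn (PySem.Chars.replace seg ['+'] [' ']) [' ']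
    (pieces.drop 1).foldl bStepPiece (st.1, st.2 ++ pieces.headD [])

def tokenize_clause_py_alt (clause : String) : List String :=
  let segs := PySem.Chars.splitOn clause.toList ['"']
  let st := (PySem.List.enumerate segs 0).foldl (fun st p => bSeg st p.1 p.2) ([], [])
  if st.2.isEmpty then st.1 else st.1 ++ [String.mk st.2]

-- ===== PRECONDITION & SPEC =====
def Spec_tokenize_clause_py (clause : String) (out : List String) : Prop := out = tokenize_clause_py_alt clause
instance (clause : String) (out : List String) : Decidable (Spec_tokenize_clause_py clause out) := by unfold Spec_tokenize_clause_py; infer_instance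

-- ===== CLAIM (what is proved, stated in full; the proofs are below) =====
def Claim_equal_tokenize_clause_py : Prop := ∀ (clause : String), Dom_tokenize_clause_py clause → Spec_tokenize_clause_py clause (tokenize_clause_py clause)

-- ===== LEMMAS AND PROOFS =====

-- substitute '+' by ' '
def subCh (c : Char) : Char := if c = '+' then ' ' else c

-- reference single-char split
def consHead (x : List Char) : List (List Char) → List (List Char)
  | [] => [x]
  | p :: ps => (x ++ p) :: ps

def mySplit (q : Char) : List Char → List (List Char)
  | [] => [[]]
  | c :: rest => if c = q then [] :: mySplit q rest else consHead [c] (mySplit q rest)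

-- A's action on a quote-free outside segment
def procOut (tokens : List String) (buf : List Char) : List Char → List String × List Char
  | [] => (tokens, buf)
  | c :: rest =>
      if c = '+' ∨ c = ' ' then
        procOut (if buf.isEmpty then tokens else tokens ++ [String.mk buf]) [] rest
      else procOut tokens (buf ++ [c]) rest

-- B as a recursion over segments with a quote-parity flag
def stepSeg (inq : Bool) (st : List String × List Char) (seg : List Char) : List String × List Char :=
  if inq then (st.1, st.2 ++ seg) else procOut st.1 st.2 seg

def bGo (inq : Bool) (st : List String × List Char) : List (List Char) → List String × List Char
  | [] => st
  | seg :: segs => bGo (!inq) (stepSeg inq st seg) segs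

def finish (st : List String × List Char) : List String :=
  if st.2.isEmpty then st.1 else st.1 ++ [String.mk st.2]

theorem replace_go_single (new : Char) (q : Char) :
    ∀ (l : List Char) (fuel : Nat) (acc : List Char), l.length ≤ fuel →
      PySem.Chars.replace.go [q] [new] fuel l acc
        = acc.reverse ++ l.map (fun c => if c = q then new else c) := by
  intro l
  induction l with
  | nil => intro fuel acc _; cases fuel <;> simp [PySem.Chars.replace.go]
  | cons c rest ih =>
      intro fuel acc h
      cases fuel with
      | zero => simp at h
      | succ f =>
          simp only [List.length_cons] at h
          by_cases hc : c = q
          · simp [PySem.Chars.replace.go, List.isPrefixOf, hc, ih f (new :: acc) (by omega)]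
          · simp [PySem.Chars.replace.go, List.isPrefixOf, hc, Ne.symm hc, ih f (c :: acc) (by omega)]

theorem replace_single (q new : Char) (l : List Char) :
    PySem.Chars.replace l [q] [new] = l.map (fun c => if c = q then new else c) := by
  simpa using replace_go_single new q l l.length [] le_rfl

theorem mySplit_ne_nil (q : Char) (l : List Char) : mySplit q l ≠ [] := by
  cases l with
  | nil => simp [mySplit]
  | cons c rest =>
      simp only [mySplit]
      split
      · simp
      · cases mySplit q rest <;> simp [consHead]

theorem splitOn_go_single (q : Char) :
    ∀ (l : List Char) (fuel : Nat) (cur : List Char) (acc : List (List Char)), l.length ≤ fuel →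
      PySem.Chars.splitOn.go [q] fuel l cur acc
        = acc.reverse ++ consHead cur.reverse (mySplit q l) := by
  intro l
  induction l with
  | nil =>
      intro fuel cur acc _
      cases fuel <;> simp [PySem.Chars.splitOn.go, mySplit, consHead]
  | cons c rest ih =>
      intro fuel cur acc h
      cases fuel with
      | zero => simp at h
      | succ f =>
          simp only [List.length_cons] at h
          by_cases hc : c = q
          · subst hc
            rw [show PySem.Chars.splitOn.go [c] (f + 1) (c :: rest) cur acc
                  = PySem.Chars.splitOn.go [c] f rest [] (cur.reverse :: acc) from by
                simp [PySem.Chars.splitOn.go, List.isPrefixOf]]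
            rw [ih f [] (cur.reverse :: acc) (by omega)]
            cases hms : mySplit c rest with
            | nil => exact absurd hms (mySplit_ne_nil c rest)
            | cons p ps => simp [mySplit, consHead, hms]
          · rw [show PySem.Chars.splitOn.go [q] (f + 1) (c :: rest) cur acc
                  = PySem.Chars.splitOn.go [q] f rest (c :: cur) acc from by
                simp [PySem.Chars.splitOn.go, List.isPrefixOf, Ne.symm hc]]
            rw [ih f (c :: cur) acc (by omega)]
            cases hms : mySplit q rest with
            | nil => exact absurd hms (mySplit_ne_nil q rest)
            | cons p ps => simp [mySplit, hc, hms, consHead, List.append_assoc]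

theorem splitOn_single (q : Char) (l : List Char) :
    PySem.Chars.splitOn l [q] = mySplit q l := by
  rw [show PySem.Chars.splitOn l [q]
        = PySem.Chars.splitOn.go [q] (l.length + 1) l [] [] from rfl,
      splitOn_go_single q l (l.length + 1) [] [] (by omega)]
  cases hms : mySplit q l with
  | nil => exact absurd hms (mySplit_ne_nil q l)
  | cons p ps => simp [consHead]

-- B's outside-segment pieces loop computes procOut
theorem pieces_loop_eq_procOut (seg : List Char) :
    ∀ (tokens : List String) (buf : List Char),
      (let pieces := mySplit ' ' (seg.map subCh)
       (pieces.drop 1).foldl bStepPiece (tokens, buf ++ pieces.headD []))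
      = procOut tokens buf seg := by
  induction seg with
  | nil => intro tokens buf; simp [mySplit, procOut]
  | cons c rest ih =>
      intro tokens buf
      cases hms : mySplit ' ' (rest.map subCh) with
      | nil => exact absurd hms (mySplit_ne_nil _ _)
      | cons p ps =>
          by_cases hsep : c = '+' ∨ c = ' '
          · have hsub : subCh c = ' ' := by rcases hsep with h | h <;> simp [subCh, h]
            have hsplit : mySplit ' ' (subCh c :: rest.map subCh) = [] :: p :: ps := by
              simp [mySplit, hsub, hms]
            have hpo : procOut tokens buf (c :: rest)
                = procOut (if buf.isEmpty then tokens else tokens ++ [String.mk buf]) [] rest := by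
              simp [procOut, hsep]
            rw [hpo, ← ih (if buf.isEmpty then tokens else tokens ++ [String.mk buf]) []]
            simp [hsplit, hms, bStepPiece]
          · have hc' : ¬ c = ' ' := fun h => hsep (Or.inr h)
            have hsub : subCh c = c := by
              simp only [subCh, if_neg (fun h => hsep (Or.inl h))]
            have hsplit : mySplit ' ' (subCh c :: rest.map subCh) = (c :: p) :: ps := by
              simp [mySplit, hsub, hms, hc', consHead]
            have hpo : procOut tokens buf (c :: rest) = procOut tokens (buf ++ [c]) rest := by
              simp [procOut, hsep]
            rw [hpo, ← ih tokens (buf ++ [c])]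
            simp [hsplit, hms, List.append_assoc]

-- bSeg agrees with stepSeg at the matching parity
theorem bSeg_eq_stepSeg (st : List String × List Char) (k : Int) (seg : List Char) :
    bSeg st k seg = stepSeg (k % 2 == 1) st seg := by
  unfold bSeg stepSeg
  cases hk : (k % 2 == 1) with
  | true => simp
  | false =>
      have := pieces_loop_eq_procOut seg st.1 st.2
      rw [replace_single, show (fun c => if c = '+' then ' ' else c) = subCh from rfl,
          splitOn_single]
      simpa using this

-- the enumerate fold is bGo at the start parity
theorem enum_foldl_eq_bGo (segs : List (List Char)) :
    ∀ (k : Int) (st : List String × List Char),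
      (PySem.List.enumerate segs k).foldl (fun st p => bSeg st p.1 p.2) st
        = bGo (k % 2 == 1) st segs := by
  induction segs with
  | nil => intro k st; simp [PySem.List.enumerate_nil, bGo]
  | cons seg segs ih =>
      intro k st
      rw [PySem.List.enumerate_cons, List.foldl_cons, ih (k + 1)]
      have hpar : ((k + 1) % 2 == 1) = !(k % 2 == 1) := by
        have h2 : k % 2 = 0 ∨ k % 2 = 1 := Int.emod_two_eq_zero_or_one k
        have h3 : (k + 1) % 2 = (k % 2 + 1) % 2 := by omega
        rcases h2 with h | h <;> simp [h3, h]
      rw [hpar, bGo, bSeg_eq_stepSeg]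

-- stepSeg on the empty segment is the identity
theorem stepSeg_nil (inq : Bool) (st : List String × List Char) : stepSeg inq st [] = st := by
  cases inq <;> simp [stepSeg, procOut]

-- main invariant: A's char machine equals B's segment machine on the quote-split
theorem tokAGo_eq_bGo (l : List Char) :
    ∀ (tokens : List String) (cur : List Char) (inq : Bool),
      tokAGo l tokens cur inq = finish (bGo inq (tokens, cur) (mySplit '"' l)) := by
  induction l with
  | nil =>
      intro tokens cur inq
      cases inq <;> simp [tokAGo, mySplit, bGo, stepSeg, procOut, finish]
  | cons c rest ih =>
      intro tokens cur inq
      by_cases hq : c = '"'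
      · subst hq
        have hA : tokAGo ('"' :: rest) tokens cur inq = tokAGo rest tokens cur (!inq) := by
          simp [tokAGo]
        have hS : mySplit '"' ('"' :: rest) = [] :: mySplit '"' rest := by simp [mySplit]
        rw [hA, hS, ih tokens cur (!inq)]
        simp [bGo, stepSeg_nil]
      · obtain ⟨p, ps, hms⟩ : ∃ p ps, mySplit '"' rest = p :: ps := by
          cases h : mySplit '"' rest with
          | nil => exact absurd h (mySplit_ne_nil _ _)
          | cons p ps => exact ⟨p, ps, rfl⟩
        have hS : mySplit '"' (c :: rest) = (c :: p) :: ps := by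
          simp [mySplit, hq, hms, consHead]
        cases inq with
        | true =>
            have hA : tokAGo (c :: rest) tokens cur true = tokAGo rest tokens (cur ++ [c]) true := by
              simp [tokAGo, hq]
            rw [hA, hS, ih tokens (cur ++ [c]) true]
            simp [hms, bGo, stepSeg, List.append_assoc]
        | false =>
            by_cases hsep : c = '+' ∨ c = ' '
            · have hb : (!false && (c == '+' || c == ' ')) = true := by
                rcases hsep with h | h <;> simp [h]
              have hA : tokAGo (c :: rest) tokens cur false
                  = if cur.isEmpty then tokAGo rest tokens [] false
                    else tokAGo rest (tokens ++ [String.mk cur]) [] false := by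
                rcases hsep with h | h <;> subst h <;> simp [tokAGo]
              have hP : procOut tokens cur (c :: p)
                  = procOut (if cur.isEmpty then tokens else tokens ++ [String.mk cur]) [] p := by
                simp [procOut, hsep]
              rw [hA, hS,
                show bGo false (tokens, cur) ((c :: p) :: ps)
                  = bGo true (procOut tokens cur (c :: p)) ps from rfl, hP]
              by_cases hce : cur.isEmpty
              · rw [if_pos hce, if_pos hce, ih tokens [] false]
                simp [hms, bGo, stepSeg]
              · rw [if_neg hce, if_neg hce, ih (tokens ++ [String.mk cur]) [] false]
                simp [hms, bGo, stepSeg]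
            · have h1 : ¬ c = '+' := fun h => hsep (Or.inl h)
              have h2 : ¬ c = ' ' := fun h => hsep (Or.inr h)
              have hA : tokAGo (c :: rest) tokens cur false
                  = tokAGo rest tokens (cur ++ [c]) false := by
                simp [tokAGo, hq, h1, h2]
              have hP : procOut tokens cur (c :: p) = procOut tokens (cur ++ [c]) p := by
                simp [procOut, hsep]
              rw [hA, hS,
                show bGo false (tokens, cur) ((c :: p) :: ps)
                  = bGo true (procOut tokens cur (c :: p)) ps from rfl, hP,
                ih tokens (cur ++ [c]) false]

              simp [hms, bGo, stepSeg]

-- ===== VERDICT (by name: the statement is the Claim_ definition above) =====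
theorem tokenize_clause_py_spec : Claim_equal_tokenize_clause_py := by
  intro clause _
  show tokAGo clause.toList [] [] false = _
  rw [tokAGo_eq_bGo]
  show _ = (let segs := PySem.Chars.splitOn clause.toList ['"']
            let st := (PySem.List.enumerate segs 0).foldl (fun st p => bSeg st p.1 p.2) ([], [])
            if st.2.isEmpty then st.1 else st.1 ++ [String.mk st.2])
  simp only [splitOn_single, enum_foldl_eq_bGo]
  rfl
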